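-- pv_equiv track=rewrite | github.com/nlkguy/hacking_github_contribution_grid | griddy.py | conv_alph
-- ===== SOURCE A (Python) =====
-- def conv_alph(alph):
--     char_3d, ln = [], []
--     for i in range(49):
--         ln.append(1 if i in alph else 0)
--         if (i + 1) % 7 == 0:
--             char_3d.append(ln)
--             ln = []
--     return char_3d
-- ===== SOURCE B (Python) =====
-- def conv_alph(alph):
--     grid = [[0] * 7 for _ in range(7)]
--     for x in alph:
--         if 0 <= x <= 48:
--             r, c = divmod(x, 7)
--             grid[r][c] = 1
--     return grid
-- ===== Notes on version B (the rewrite author's own statement) =====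
-- stated objective: faster
-- what changed: Instead of scanning all 49 cells and testing each index for membership in alph, B allocates a 7x7 zero grid and scatters a single pass over alph into it via divmod, eliminating the membership test entirely.
import Mathlib
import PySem

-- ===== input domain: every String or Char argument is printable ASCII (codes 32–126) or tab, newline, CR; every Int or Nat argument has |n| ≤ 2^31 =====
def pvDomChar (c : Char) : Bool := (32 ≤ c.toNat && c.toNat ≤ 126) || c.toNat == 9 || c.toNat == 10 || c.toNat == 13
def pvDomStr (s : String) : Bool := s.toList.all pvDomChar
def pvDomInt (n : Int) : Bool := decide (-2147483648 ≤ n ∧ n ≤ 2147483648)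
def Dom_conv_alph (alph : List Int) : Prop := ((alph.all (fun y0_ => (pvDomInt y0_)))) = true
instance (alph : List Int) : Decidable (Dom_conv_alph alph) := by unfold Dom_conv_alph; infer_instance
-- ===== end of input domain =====

-- B replaces A's 49-cell scan with membership tests by a single scatter pass over alph into a preallocated 7x7 zero grid (objective: faster, fewer membership scans).


-- ===== PORT A =====
def conv_alph (alph : List Int) : List (List Int) :=
  -- literal port of A: fold over range(49) with state (char_3d, ln), flushing ln every 7th step
  let st := (PySem.List.pyRange 0 49 1).foldl
    (fun (st : List (List Int) × List Int) i =>
      let ln := st.2 ++ [if i ∈ alph then (1 : Int) else 0]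
      if (i + 1) % 7 == 0 then (st.1 ++ [ln], []) else (st.1, ln))
    ([], [])
  st.1

-- ===== PORT B =====
def conv_alph_alt (alph : List Int) : List (List Int) :=
  -- port of B: start from a 7x7 zero grid, scatter each in-range x of alph to cell (x // 7, x % 7)
  alph.foldl
    (fun grid x =>
      if 0 ≤ x ∧ x ≤ 48 then
        let r := PySem.Int.floordiv x 7
        let c := PySem.Int.mod x 7
        grid.modify r.toNat (fun row => row.set c.toNat 1)
      else grid)
    (List.replicate 7 (List.replicate 7 (0 : Int)))

-- ===== PRECONDITION & SPEC =====
def Spec_conv_alph (alph : List Int) (out : List (List Int)) : Prop := out = conv_alph_alt alph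
instance (alph : List Int) (out : List (List Int)) : Decidable (Spec_conv_alph alph out) := by unfold Spec_conv_alph; infer_instance

-- ===== CLAIM (what is proved, stated in full; the proofs are below) =====
def Claim_equal_conv_alph : Prop := ∀ (alph : List Int), Dom_conv_alph alph → Spec_conv_alph alph (conv_alph alph)

-- ===== LEMMAS AND PROOFS =====

-- the common characterisation: cell (r,c) is 1 iff 7*r+c is in s
def pvMark (s : List Int) : List (List Int) :=
  (List.range 7).map (fun r => (List.range 7).map (fun c =>
    if ((7 * r + c : Nat) : Int) ∈ s then (1 : Int) else 0))

theorem conv_alph_eq_mark (alph : List Int) : conv_alph alph = pvMark alph := by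
  simp only [conv_alph, pvMark, PySem.List.pyRange]
  norm_num [show ((49:Int).toNat) = 49 from rfl, List.range_succ]

theorem mark_append (s : List Int) (x : Int) (h : 0 ≤ x ∧ x ≤ 48) :
    pvMark (s ++ [x]) =
      (pvMark s).modify (PySem.Int.floordiv x 7).toNat
        (fun row => row.set (PySem.Int.mod x 7).toNat 1) := by
  have hfd : PySem.Int.floordiv x 7 = x / 7 := PySem.Int.floordiv_eq_ediv_of_pos (by omega)
  have hmd : PySem.Int.mod x 7 = x % 7 := PySem.Int.mod_eq_emod_of_pos (by omega)
  obtain ⟨q, hq'⟩ : ∃ q : Nat, (q : Int) = x / 7 := ⟨(x / 7).toNat, Int.toNat_of_nonneg (by omega)⟩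
  obtain ⟨m, hm'⟩ : ∃ m : Nat, (m : Int) = x % 7 := ⟨(x % 7).toNat, Int.toNat_of_nonneg (by omega)⟩
  rw [hfd, hmd, show (x / 7).toNat = q from by omega, show (x % 7).toNat = m from by omega]
  have hql : q < 7 := by omega
  have hml : m < 7 := by omega
  apply List.ext_getElem
  · simp [pvMark, List.length_modify]
  intro r hr1 hr2
  have hrl : r < 7 := by simpa [pvMark] using hr1
  rw [List.getElem_modify]
  by_cases hrq : q = r
  · rw [if_pos hrq]
    subst hrq
    apply List.ext_getElem
    · simp [pvMark]
    intro c hc1 hc2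
    have hcl : c < 7 := by
      have := hc1; simp [pvMark] at this; omega
    rw [List.getElem_set]
    simp only [pvMark, List.getElem_map, List.getElem_range]
    by_cases hcq : m = c
    · rw [if_pos hcq]
      have hx : ((7 * q + c : Nat) : Int) = x := by push_cast; omega
      simp [hx]
    · rw [if_neg hcq]
      have hx : ((7 * q + c : Nat) : Int) ≠ x := by push_cast; omega
      simp only [List.mem_append, List.mem_singleton, hx, or_false]
  · -- row untouched: no index 7*r+c in this row can equal x
    rw [if_neg hrq]
    simp only [pvMark, List.getElem_map, List.getElem_range]
    apply List.map_congr_left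
    intro c hcmem
    have hcl : c < 7 := List.mem_range.mp hcmem
    have hx : ((7 * r + c : Nat) : Int) ≠ x := by push_cast; omega
    simp only [List.mem_append, List.mem_singleton, hx, or_false]

theorem conv_alph_alt_eq_mark (alph : List Int) : conv_alph_alt alph = pvMark alph := by
  simp only [conv_alph_alt]
  induction alph using List.reverseRecOn with
  | nil => decide
  | append_singleton s x ih =>
      rw [List.foldl_append, List.foldl_cons, List.foldl_nil, ih]
      by_cases h : 0 ≤ x ∧ x ≤ 48
      · simp only [if_pos h]
        exact (mark_append s x h).symm
      · rw [if_neg h]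
        -- x outside [0,48]: no cell index equals x, so memberships are unchanged
        simp only [pvMark]
        apply List.map_congr_left
        intro r hrmem
        apply List.map_congr_left
        intro c hcmem
        have hrl : r < 7 := List.mem_range.mp hrmem
        have hcl : c < 7 := List.mem_range.mp hcmem
        have hx : ((7 * r + c : Nat) : Int) ≠ x := by
          intro hEq; apply h; push_cast at hEq; omega
        push_cast at hx
        simp [List.mem_append, hx]

-- ===== VERDICT (by name: the statement is the Claim_ definition above) =====
theorem conv_alph_spec : Claim_equal_conv_alph := by
  intro alph _
  show conv_alph alph = conv_alph_alt alph
  rw [conv_alph_eq_mark, conv_alph_alt_eq_mark]
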